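-- pv_equiv track=rewrite | github.com/junha6316/Algorithm | 0704_continuous_sum.py | solution
-- ===== SOURCE A (Python) =====
-- def solution(arr):
--     N = len(arr)
--     DP=[arr[0]]+[0 for _ in range(1,N)]
--     Max=arr[0]
--
--
--     for i in range(1,N):
--         Max = max(Max+arr[i], arr[i])
--         DP[i] = max(DP[i-1],Max,arr[i])
--
--     return DP
-- ===== SOURCE B (Python) =====
-- def solution(arr):
--     # prefix-sum formulation: best subarray sum in arr[:i+1] is the running
--     # maximum of (prefix sum) - (minimum prefix sum seen before the element)
--     out, pref, low = [], 0, 0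
--     for x in arr:
--         pref += x
--         cand = pref - low
--         out.append(cand if not out else max(out[-1], cand))
--         low = min(low, pref)
--     return out
-- ===== Notes on version B (the rewrite author's own statement) =====
-- stated objective: alternative
-- what changed: Replaces Kadane's best-ending-here recurrence (Max = max(Max+arr[i], arr[i]) with a DP array) by the prefix-sum algorithm: maintain a running prefix sum and the minimum prefix sum seen so far; the best subarray ending at i is their difference, prefix-maximised into the output.
import Mathlib
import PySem

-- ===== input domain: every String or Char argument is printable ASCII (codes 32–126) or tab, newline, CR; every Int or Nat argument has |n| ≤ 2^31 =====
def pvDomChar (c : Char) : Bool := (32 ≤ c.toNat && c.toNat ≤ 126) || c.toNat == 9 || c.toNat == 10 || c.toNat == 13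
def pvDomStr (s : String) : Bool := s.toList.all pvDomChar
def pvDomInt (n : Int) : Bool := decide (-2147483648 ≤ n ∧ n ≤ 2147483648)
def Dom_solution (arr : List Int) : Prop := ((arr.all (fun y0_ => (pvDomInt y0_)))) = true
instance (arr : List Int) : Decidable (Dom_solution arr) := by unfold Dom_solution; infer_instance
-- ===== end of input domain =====

-- B replaces A's Kadane recurrence by the prefix-sum algorithm (running prefix sum minus
-- minimum prefix sum, prefix-maximised); return value only.

-- ===== PORT A =====
def solution (arr : List Int) : List Int :=
  match PySem.List.pyGet? arr 0 with
  | none => []   -- reading the first element raises IndexError in Python; excluded by Pre_solution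
  | some a0 =>
    let N : Int := arr.length
    let DP : List Int := [a0] ++ (PySem.List.pyRange 1 N 1).map (fun _ => (0 : Int))
    let st := (PySem.List.pyRange 1 N 1).foldl
      (fun (st : List Int × Int) i =>
        let ai := PySem.List.pyGetD arr i 0
        let M := max (st.2 + ai) ai
        (PySem.List.pySetD st.1 i (max (max (PySem.List.pyGetD st.1 (i - 1) 0) M) ai), M))
      (DP, a0)
    st.1

-- ===== PORT B =====
def solution_alt (arr : List Int) : List Int :=
  (arr.foldl
    (fun (st : List Int × Int × Int) x =>
      let pref := st.2.1 + x
      let cand := pref - st.2.2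
      (st.1 ++ [if st.1 = [] then cand else max (PySem.List.pyGetD st.1 (-1) 0) cand],
        pref, min st.2.2 pref))
    ([], 0, 0)).1

-- ===== PRECONDITION & SPEC =====
-- A reads the first element unconditionally, so the empty list raises IndexError; that is the only exclusion.
def Pre_solution (arr : List Int) : Prop := arr ≠ []
instance (arr : List Int) : Decidable (Pre_solution arr) := by unfold Pre_solution; infer_instance
def pvWitness_solution : List Int := [3, -1, 2]

def Spec_solution (arr : List Int) (out : List Int) : Prop := out = solution_alt arr
instance (arr : List Int) (out : List Int) : Decidable (Spec_solution arr out) := by unfold Spec_solution; infer_instance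

-- ===== CLAIM (what is proved, stated in full; the proofs are below) =====
def Claim_equal_solution : Prop := ∀ (arr : List Int), Dom_solution arr → Pre_solution arr → Spec_solution arr (solution arr)

-- ===== LEMMAS AND PROOFS =====

/-- Structural recursion for A's loop: state (Max, DP[i-1]), emitting DP[i]. -/
def gA (M l : Int) : List Int → List Int
  | [] => []
  | x :: xs =>
    let M' := max (M + x) x
    let d := max (max l M') x
    d :: gA M' d xs

/-- Structural recursion for B's loop after the first element:
state (last output, prefix sum, minimum prefix sum so far), emitting out[i]. -/
def gB (l pref low : Int) : List Int → List Int
  | [] => []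
  | x :: xs =>
    let p := pref + x
    let d := max l (p - low)
    d :: gB d p (min low p) xs

lemma getD_append_length (pre : List Int) (x : Int) (xs : List Int) :
    (pre ++ x :: xs).getD pre.length 0 = x := by
  simp [List.getD]

lemma getD_pred_eq_getLastD (P ys : List Int) (hP : P ≠ []) :
    (P ++ ys).getD (P.length - 1) 0 = P.getLastD 0 := by
  have h1 : P.length - 1 < P.length := by
    cases P with | nil => exact absurd rfl hP | cons a as => simp
  rw [List.getD, List.getElem?_append_left h1, List.getElem?_eq_getElem h1]
  rw [List.getLastD_eq_getLast?, List.getLast?_eq_getElem?, List.getElem?_eq_getElem h1]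

lemma set_append_length (P : List Int) (a v : Int) (ys : List Int) :
    (P ++ a :: ys).set P.length v = P ++ v :: ys := by
  induction P with
  | nil => simp
  | cons p ps ih => simp [ih]

/-- Invariant for A's index loop. -/
lemma loopA :
    ∀ (suf pre P : List Int) (Max : Int), pre.length = P.length → P ≠ [] →
      ((PySem.List.pyRange (P.length : Int) ((P.length : Int) + (suf.length : Int)) 1).foldl
        (fun (st : List Int × Int) i =>
          let ai := PySem.List.pyGetD (pre ++ suf) i 0
          let M := max (st.2 + ai) ai
          (PySem.List.pySetD st.1 i (max (max (PySem.List.pyGetD st.1 (i - 1) 0) M) ai), M))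
        (P ++ List.replicate suf.length 0, Max)).1
      = P ++ gA Max (P.getLastD 0) suf := by
  intro suf
  induction suf with
  | nil =>
    intro pre P Max hlen hP
    rw [PySem.List.pyRange_one_eq_nil (by simp)]
    simp [gA]
  | cons x xs ih =>
    intro pre P Max hlen hP
    have hPpos : 0 < P.length := List.length_pos_iff.mpr hP
    rw [PySem.List.pyRange_one_cons (by simp only [List.length_cons]; push_cast; omega)]
    simp only [List.foldl_cons]
    have hai : PySem.List.pyGetD (pre ++ x :: xs) (P.length : Int) (0 : Int) = x := by
      rw [show ((P.length : Int)) = ((pre.length : Nat) : Int) by rw [hlen],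
        PySem.List.pyGetD_natCast, getD_append_length]
    have hprev : PySem.List.pyGetD (P ++ List.replicate (x :: xs).length 0)
        ((P.length : Int) - 1) (0 : Int) = P.getLastD 0 := by
      rw [show ((P.length : Int) - 1) = ((P.length - 1 : Nat) : Int) by omega,
        PySem.List.pyGetD_natCast, getD_pred_eq_getLastD _ _ hP]
    have hset : ∀ v : Int, PySem.List.pySetD (P ++ List.replicate (x :: xs).length 0)
        (P.length : Int) v = (P ++ [v]) ++ List.replicate xs.length 0 := by
      intro v
      rw [PySem.List.pySetD_natCast]
      simp only [List.length_cons, List.replicate_succ]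
      rw [set_append_length]
      simp
    simp only [hai, hprev, hset]
    set M' := max (Max + x) x with hM'
    set d := max (max (P.getLastD 0) M') x with hd
    have harr : pre ++ x :: xs = (pre ++ [x]) ++ xs := by simp
    have hrange : PySem.List.pyRange ((P.length : Int) + 1)
        ((P.length : Int) + ((x :: xs).length : Int)) 1
        = PySem.List.pyRange (((P ++ [d]).length : Nat) : Int)
          ((((P ++ [d]).length : Nat) : Int) + (xs.length : Int)) 1 := by
      have h1 : (P.length : Int) + 1 = (((P ++ [d]).length : Nat) : Int) := by simp
      have h2 : (P.length : Int) + ((x :: xs).length : Int)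
          = (((P ++ [d]).length : Nat) : Int) + ((xs.length : Nat) : Int) := by
        simp; omega
      rw [h2, h1]
    rw [harr, hrange, ih (pre ++ [x]) (P ++ [d]) M' (by simp [hlen]) (by simp)]
    rw [List.getLastD_concat, List.append_assoc, List.singleton_append]
    simp only [gA, ← hM', ← hd]

lemma solutionA_closed (a0 : Int) (rest : List Int) :
    solution (a0 :: rest) = a0 :: gA a0 a0 rest := by
  have hget : PySem.List.pyGet? (a0 :: rest) 0 = some a0 := by
    simp [PySem.List.pyGet?, PySem.List.pyIdx?]
  have hDP : (PySem.List.pyRange 1 ((a0 :: rest).length : Int) 1).map (fun _ => (0 : Int))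
      = List.replicate rest.length 0 := by
    apply List.eq_replicate_iff.mpr
    constructor
    · simp [PySem.List.length_pyRange_one]
    · intro b hb; simp at hb; exact hb.2
  have hb : PySem.List.pyRange 1 (((a0 :: rest).length : Nat) : Int) 1
      = PySem.List.pyRange ((([a0] : List Int).length : Nat) : Int)
        (((([a0] : List Int).length : Nat) : Int) + (rest.length : Int)) 1 := by
    congr 1 <;> simp <;> omega
  simp only [solution, hget]
  rw [hDP, hb]
  have := loopA rest [a0] [a0] a0 rfl (by simp)
  simpa using this

/-- Invariant for B's loop once the output is nonempty. -/
lemma loopB :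
    ∀ (xs : List Int) (P : List Int) (pref low : Int), P ≠ [] →
      (xs.foldl
        (fun (st : List Int × Int × Int) x =>
          let p := st.2.1 + x
          let c := p - st.2.2
          (st.1 ++ [if st.1 = [] then c else max (PySem.List.pyGetD st.1 (-1) 0) c],
            p, min st.2.2 p))
        (P, pref, low)).1
      = P ++ gB (P.getLastD 0) pref low xs := by
  intro xs
  induction xs with
  | nil => intro P pref low hP; simp [gB]
  | cons x xs ih =>
    intro P pref low hP
    have hlast : PySem.List.pyGetD P (-1) (0 : Int) = P.getLastD 0 := by
      rw [PySem.List.pyGetD_neg_one P 0 hP, List.getLastD_eq_getLast?,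
        List.getLast?_eq_some_getLast hP]
      rfl
    simp only [List.foldl_cons, if_neg hP, hlast]
    rw [ih (P ++ [max (P.getLastD 0) (pref + x - low)]) _ _ (by simp)]
    rw [List.getLastD_concat, List.append_assoc, List.singleton_append]
    simp only [gB]

lemma solutionB_closed (a0 : Int) (rest : List Int) :
    solution_alt (a0 :: rest) = a0 :: gB a0 a0 (min 0 a0) rest := by
  simp only [solution_alt, List.foldl_cons]
  have h0 : (0 : Int) + a0 - 0 = a0 := by ring
  simp only [if_pos rfl, h0, List.nil_append, zero_add]
  have := loopB rest [a0] a0 (min 0 a0) (by simp)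
  simpa using this

/-- The two recurrences agree: Kadane's Max equals prefix − minimum prefix. -/
lemma gA_eq_gB : ∀ (xs : List Int) (M l pref low : Int),
    pref - low = max M 0 → gA M l xs = gB l pref low xs := by
  intro xs
  induction xs with
  | nil => intro M l pref low h; simp [gA, gB]
  | cons x xs ih =>
    intro M l pref low h
    simp only [gA, gB]
    have hc : pref + x - low = max (M + x) x := by
      omega
    have hd : max (max l (max (M + x) x)) x = max l (max (M + x) x) :=
      max_eq_left (le_trans (le_max_right (M + x) x) (le_max_right _ _))
    rw [hc, hd]
    congr 1
    apply ih
    omega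

-- ===== VERDICT (by name: the statement is the Claim_ definition above) =====
theorem solution_spec : Claim_equal_solution := by
  intro arr _ hpre
  unfold Spec_solution
  cases arr with
  | nil => exact absurd rfl hpre
  | cons a0 rest =>
    rw [solutionA_closed, solutionB_closed]
    congr 1
    apply gA_eq_gB
    omega
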